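-- pv_equiv track=rewrite | github.com/zeropep/code-embedding-ai | src/security/content_masker.py | _get_quote_char
-- ===== SOURCE A (Python) =====
-- from typing import List, Dict, Tuple, Optional
--
-- def _get_quote_char(text: str, reverse: bool = False) -> Optional[str]:
--     """Get the last/first quote character from text"""
--     quotes = ['"', "'", '`']
--
--     if reverse:
--         for char in reversed(text):
--             if char in quotes:
--                 return char
--     else:
--         for char in text:
--             if char in quotes:
--                 return char
--
--     return None
-- ===== SOURCE B (Python) =====
-- from typing import Optional
--
-- def _get_quote_char(text: str, reverse: bool = False) -> Optional[str]:
--     """Get the last/first quote character from text"""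
--     hits = [ch for ch in text if ch in '"\'`']
--     if not hits:
--         return None
--     return hits[-1] if reverse else hits[0]
-- ===== Notes on version B (the rewrite author's own statement) =====
-- stated objective: simpler
-- what changed: Replaces the two direction-dependent early-return scans (one over reversed(text)) with a single forward comprehension that collects all quote characters and then selects the first or last.
import Mathlib
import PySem

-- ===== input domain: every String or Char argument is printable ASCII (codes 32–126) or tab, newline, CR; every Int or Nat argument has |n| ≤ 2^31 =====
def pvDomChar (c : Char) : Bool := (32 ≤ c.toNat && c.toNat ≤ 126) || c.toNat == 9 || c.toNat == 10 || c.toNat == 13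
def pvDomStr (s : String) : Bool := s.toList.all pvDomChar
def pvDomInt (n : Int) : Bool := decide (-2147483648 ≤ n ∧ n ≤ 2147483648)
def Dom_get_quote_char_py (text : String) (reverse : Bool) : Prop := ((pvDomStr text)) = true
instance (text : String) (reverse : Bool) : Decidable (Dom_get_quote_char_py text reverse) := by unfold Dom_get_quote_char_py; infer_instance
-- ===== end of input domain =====

-- B replaces A's two direction-dependent early-return scans with one forward pass that
-- collects the quote characters and selects the first or last (objective: simpler).

-- ===== PORT A =====
-- quotes = ['"', "'", '`']
def pvQuotesA : List String := ["\"", "'", "`"]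

-- the early-return for-loop over the characters (the reverse branch runs it on reversed(text));
-- the trailing `return None` is the [] case
def pvScanA : List Char → Option String
  | [] => none
  | c :: rest =>
      if String.ofList [c] ∈ pvQuotesA then some (String.ofList [c]) else pvScanA rest

def get_quote_char_py (text : String) (reverse : Bool) : Option String :=
  if reverse then pvScanA text.toList.reverse else pvScanA text.toList

-- ===== PORT B =====
-- hits = [ch for ch in text if ch in '"\'`']
def pvHitsB (text : String) : List Char :=
  text.toList.filter (fun c => PySem.Chars.isIn [c] "\"'`".toList)

-- if not hits: return None;  return hits[-1] if reverse else hits[0]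
def get_quote_char_py_alt (text : String) (reverse : Bool) : Option String :=
  match pvHitsB text with
  | [] => none
  | c :: rest =>
      some (String.ofList [if reverse then (c :: rest).getLast (by simp) else c])

-- ===== PRECONDITION & SPEC =====
def Spec_get_quote_char_py (text : String) (reverse : Bool) (out : Option String) : Prop := out = get_quote_char_py_alt text reverse
instance (text : String) (reverse : Bool) (out : Option String) : Decidable (Spec_get_quote_char_py text reverse out) := by unfold Spec_get_quote_char_py; infer_instance

-- ===== CLAIM (what is proved, stated in full; the proofs are below) =====
def Claim_equal_get_quote_char_py : Prop := ∀ (text : String) (reverse : Bool), Dom_get_quote_char_py text reverse → Spec_get_quote_char_py text reverse (get_quote_char_py text reverse)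

-- ===== LEMMAS AND PROOFS =====

lemma pv_singleton_infix {c : Char} {l : List Char} : [c] <:+: l ↔ c ∈ l := by
  constructor
  · intro h; exact h.sublist.subset (by simp)
  · intro h
    obtain ⟨s, t, rfl⟩ := List.append_of_mem h
    exact ⟨s, t, by simp⟩

lemma pv_qlist : "\"'`".toList = ['"', '\'', '`'] := by decide

lemma pv_pred_eq (c : Char) :
    (decide (String.ofList [c] ∈ pvQuotesA)) = PySem.Chars.isIn [c] "\"'`".toList := by
  rw [pv_qlist]
  by_cases h : c ∈ ['"', '\'', '`']
  · have h1 : PySem.Chars.isIn [c] ['"', '\'', '`'] = true := by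
      rw [PySem.Chars.isIn_iff_infix]; exact pv_singleton_infix.mpr h
    have h2 : String.ofList [c] ∈ pvQuotesA := by
      fin_cases h <;> decide
    simp [h1, h2]
  · have h1 : PySem.Chars.isIn [c] ['"', '\'', '`'] = false := by
      rw [PySem.Chars.isIn_eq_false_iff]
      exact fun hi => h (pv_singleton_infix.mp hi)
    have h2 : String.ofList [c] ∉ pvQuotesA := by
      intro hm
      apply h
      simp only [pvQuotesA, List.mem_cons, List.not_mem_nil, or_false] at hm
      rcases hm with hm | hm | hm <;>
        · have h3 := congrArg String.toList hm
          simp at h3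
          simp [h3]
    simp [h1, h2]

lemma pv_scan_eq_head (cs : List Char) :
    pvScanA cs =
      ((cs.filter (fun c => PySem.Chars.isIn [c] "\"'`".toList)).head?).map
        (fun c => String.ofList [c]) := by
  induction cs with
  | nil => simp [pvScanA]
  | cons c rest ih =>
      rw [List.filter_cons]
      by_cases h : String.ofList [c] ∈ pvQuotesA
      · have hb : PySem.Chars.isIn [c] "\"'`".toList = true := by
          rw [← pv_pred_eq]; simp [h]
        rw [pvScanA, if_pos h, hb]
        simp
      · have hb : PySem.Chars.isIn [c] "\"'`".toList = false := by
          rw [← pv_pred_eq]; simp [h]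
        rw [pvScanA, if_neg h, hb]
        simpa using ih

-- ===== VERDICT (by name: the statement is the Claim_ definition above) =====
theorem get_quote_char_py_spec : Claim_equal_get_quote_char_py := by
  intro text reverse _
  unfold Spec_get_quote_char_py get_quote_char_py get_quote_char_py_alt
  cases reverse with
  | false =>
      rw [if_neg (by simp), pv_scan_eq_head]
      cases h : pvHitsB text with
      | nil => rw [show (List.filter (fun c => PySem.Chars.isIn [c] "\"'`".toList) text.toList) = [] from h]; rfl
      | cons c rest =>
          rw [show (List.filter (fun c => PySem.Chars.isIn [c] "\"'`".toList) text.toList) = c :: rest from h]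
          simp
  | true =>
      rw [if_pos rfl, pv_scan_eq_head, List.filter_reverse]
      cases h : pvHitsB text with
      | nil =>
          rw [show (List.filter (fun c => PySem.Chars.isIn [c] "\"'`".toList) text.toList) = [] from h]
          rfl
      | cons c rest =>
          rw [show (List.filter (fun c => PySem.Chars.isIn [c] "\"'`".toList) text.toList) = c :: rest from h,
            List.head?_reverse]
          simp [List.getLast?_eq_some_getLast]
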